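-- pv_equiv track=rewrite | github.com/sylfort/Python-practice | iaml_p19_02.py | calc_nth_term
-- ===== SOURCE A (Python) =====
-- def calc_nth_term(n):
--     if n == 1:
--         return 25
--     else:
--         previous = calc_nth_term(n-1)
--         if previous % 2 == 0:
--             return int(previous / 2)
--         else:
--             return int(previous * 3 + 1)
-- ===== SOURCE B (Python) =====
-- def calc_nth_term(n):
--     term = 25
--     for _ in range(n - 1):
--         term = term // 2 if term % 2 == 0 else term * 3 + 1
--     return term
-- ===== Notes on version B (the rewrite author's own statement) =====
-- stated objective: simpler
-- what changed: Replaces the recursive definition (build the call stack down to n=1, then apply the step on the way back) by a single iterative loop applying the Collatz step n-1 times to an accumulator.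
import Mathlib
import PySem

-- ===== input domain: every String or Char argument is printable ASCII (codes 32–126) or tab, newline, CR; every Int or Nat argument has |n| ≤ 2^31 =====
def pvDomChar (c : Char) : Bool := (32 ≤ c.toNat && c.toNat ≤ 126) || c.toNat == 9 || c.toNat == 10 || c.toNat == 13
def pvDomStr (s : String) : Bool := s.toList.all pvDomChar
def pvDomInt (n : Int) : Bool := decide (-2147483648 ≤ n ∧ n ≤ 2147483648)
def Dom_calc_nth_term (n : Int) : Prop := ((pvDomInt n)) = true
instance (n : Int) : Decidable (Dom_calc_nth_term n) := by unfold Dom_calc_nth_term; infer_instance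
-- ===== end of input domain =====

-- B replaces A's recursion by an iterative loop applying the same step, constant space.
-- On nonpositive arguments (outside Pre_) A recurses without a base case (RecursionError).

-- ===== PORT A =====
-- Literal port of A's recursion; the 'n ≤ 1' guard only totalises it (on Pre_, n ≥ 1,
-- it coincides with Python's 'n == 1' base case). int(previous/2) is taken on an even
-- nonnegative 'previous' (the orbit of 25), where truncating float division = Int division.
def calc_nth_term (n : Int) : Int :=
  if _h : n ≤ 1 then 25
  else
    let previous := calc_nth_term (n - 1)
    if previous % 2 = 0 then previous / 2 else previous * 3 + 1
termination_by n.toNat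
decreasing_by omega

-- ===== PORT B =====
def calc_nth_term_alt (n : Int) : Int :=
  (PySem.List.pyRange 0 (n - 1) 1).foldl
    (fun term _ => if term % 2 = 0 then term / 2 else term * 3 + 1) 25

-- ===== PRECONDITION & SPEC =====
-- Pre_ excludes nonpositive arguments, where Python A recurses with no base case (RecursionError).
def Pre_calc_nth_term (n : Int) : Prop := 1 ≤ n
instance (n : Int) : Decidable (Pre_calc_nth_term n) := by unfold Pre_calc_nth_term; infer_instance
def pvWitness_calc_nth_term : Int := 5

def Spec_calc_nth_term (n : Int) (out : Int) : Prop := out = calc_nth_term_alt n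
instance (n : Int) (out : Int) : Decidable (Spec_calc_nth_term n out) := by unfold Spec_calc_nth_term; infer_instance

-- ===== CLAIM (what is proved, stated in full; the proofs are below) =====
def Claim_equal_calc_nth_term : Prop := ∀ (n : Int), Dom_calc_nth_term n → Pre_calc_nth_term n → Spec_calc_nth_term n (calc_nth_term n)

-- ===== LEMMAS AND PROOFS =====

lemma calc_nth_term_agree (m : Nat) :
    calc_nth_term ((m : Int) + 1) = calc_nth_term_alt ((m : Int) + 1) := by
  induction m with
  | zero =>
    rw [calc_nth_term]
    simp [calc_nth_term_alt, PySem.List.pyRange_one_eq_nil]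
  | succ k ih =>
    push_cast
    have hA : calc_nth_term ((k : Int) + 1 + 1) =
        (let previous := calc_nth_term ((k : Int) + 1);
         if previous % 2 = 0 then previous / 2 else previous * 3 + 1) := by
      rw [calc_nth_term]
      have : ¬ ((k : Int) + 1 + 1 ≤ 1) := by omega
      simp only [this, dif_neg, not_false_iff]
      ring_nf
    have hrange : PySem.List.pyRange 0 ((k : Int) + 1 + 1 - 1) 1 =
        PySem.List.pyRange 0 ((k : Int) + 1 - 1) 1 ++ [(k : Int)] := by
      have h1 : ((k : Int) + 1 + 1 - 1) = (k : Int) + 1 := by ring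
      have h2 : ((k : Int) + 1 - 1) = (k : Int) := by ring
      rw [h1, h2, PySem.List.pyRange_one_succ_right (by positivity)]
    simp only [calc_nth_term_alt] at ih ⊢
    rw [hA, hrange, List.foldl_append, ← ih]
    simp

-- ===== VERDICT (by name: the statement is the Claim_ definition above) =====
theorem calc_nth_term_spec : Claim_equal_calc_nth_term := by
  intro n _ hpre
  unfold Spec_calc_nth_term
  have hm : ∃ m : Nat, n = (m : Int) + 1 := ⟨(n - 1).toNat, by unfold Pre_calc_nth_term at hpre; omega⟩
  obtain ⟨m, rfl⟩ := hm
  exact calc_nth_term_agree m
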